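-- pv_equiv track=rewrite | github.com/harrisdudu/AI-Ready-MCP | 2-语料预处理Agent/9-OCR识别算子/dotsocr_inference_only-master/dotsocr_inference_only-master/dots_ocr/utils/format_transformer_v2.py | _convert_controls_outside_math
-- ===== SOURCE A (Python) =====
-- def _convert_controls_outside_math(text: str) -> str:
--     """Convert \\r, \\n, \\t sequences to real control characters outside of math segments."""
--     if not text or '\\' not in text:
--         return text
--
--     result = []
--     i = 0
--     length = len(text)
--     math_stack = []
--
--     def _is_escaped_dollar(idx: int) -> bool:
--         backslashes = 0
--         j = idx - 1
--         while j >= 0 and text[j] == '\\':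
--             backslashes += 1
--             j -= 1
--         return backslashes % 2 == 1
--
--     while i < length:
--         ch = text[i]
--
--         # Handle $ / $$ math regions
--         if ch == '$' and not _is_escaped_dollar(i):
--             j = i
--             while j < length and text[j] == '$':
--                 j += 1
--             delim = text[i:j]
--             result.append(delim)
--             i = j
--             if math_stack and math_stack[-1] == delim:
--                 math_stack.pop()
--             else:
--                 math_stack.append(delim)
--             continue
--
--         if ch == '\\':
--             # Handle \( \) and \[ \] math regions
--             if text.startswith('\\(', i):
--                 result.append('\\(')
--                 math_stack.append('\\)')
--                 i += 2
--                 continue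
--             if text.startswith('\\[', i):
--                 result.append('\\[')
--                 math_stack.append('\\]')
--                 i += 2
--                 continue
--             if math_stack and text.startswith(math_stack[-1], i):
--                 closing = math_stack.pop()
--                 result.append(closing)
--                 i += len(closing)
--                 continue
--
--             if math_stack:
--                 result.append(ch)
--                 i += 1
--                 continue
--
--             # Outside math regions: convert control sequences
--             if text.startswith('\\r\\n', i):
--                 result.append('\n')
--                 i += 4
--                 continue
--             if text.startswith('\\n', i):
--                 result.append('\n')
--                 i += 2
--                 continue
--             if text.startswith('\\r', i):
--                 result.append('\n')
--                 i += 2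
--                 continue
--         result.append(ch)
--         i += 1
--
--     return ''.join(result)
-- ===== SOURCE B (Python) =====
-- def _convert_plain(seg: str) -> str:
--     """Convert \\r\\n, \\n, \\r escape sequences in a plain (non-math) segment."""
--     res = []
--     k = 0
--     m = len(seg)
--     while k < m:
--         if seg.startswith('\\r\\n', k):
--             res.append('\n')
--             k += 4
--         elif seg.startswith('\\n', k) or seg.startswith('\\r', k):
--             res.append('\n')
--             k += 2
--         else:
--             res.append(seg[k])
--             k += 1
--     return ''.join(res)
--
--
-- def _convert_controls_outside_math(text: str) -> str:
--     """Convert \\r, \\n, \\t sequences to real control characters outside of math segments."""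
--     if not text or '\\' not in text:
--         return text
--
--     def _is_escaped_dollar(idx: int) -> bool:
--         backslashes = 0
--         j = idx - 1
--         while j >= 0 and text[j] == '\\':
--             backslashes += 1
--             j -= 1
--         return backslashes % 2 == 1
--
--     # Pass 1: split the text into tagged segments (is_math, chunk); no conversion here.
--     segments = []
--     buf = []          # pending plain (outside-math) characters
--     math_stack = []
--     i = 0
--     n = len(text)
--     while i < n:
--         ch = text[i]
--         if ch == '$' and not _is_escaped_dollar(i):
--             j = i
--             while j < n and text[j] == '$':
--                 j += 1
--             delim = text[i:j]
--             if buf: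
--                 segments.append((False, ''.join(buf)))
--                 buf = []
--             segments.append((True, delim))
--             if math_stack and math_stack[-1] == delim:
--                 math_stack.pop()
--             else:
--                 math_stack.append(delim)
--             i = j
--         elif ch == '\\' and text.startswith('\\(', i):
--             if buf:
--                 segments.append((False, ''.join(buf)))
--                 buf = []
--             segments.append((True, '\\('))
--             math_stack.append('\\)')
--             i += 2
--         elif ch == '\\' and text.startswith('\\[', i):
--             if buf:
--                 segments.append((False, ''.join(buf)))
--                 buf = []
--             segments.append((True, '\\['))
--             math_stack.append('\\]')
--             i += 2
--         elif ch == '\\' and math_stack and text.startswith(math_stack[-1], i):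
--             closing = math_stack.pop()
--             segments.append((True, closing))
--             i += len(closing)
--         elif math_stack:
--             segments.append((True, ch))
--             i += 1
--         else:
--             buf.append(ch)
--             i += 1
--     if buf:
--         segments.append((False, ''.join(buf)))
--
--     # Pass 2: convert control escapes in the plain segments only, then join.
--     return ''.join(seg if is_math else _convert_plain(seg) for is_math, seg in segments)
-- ===== Notes on version B (the rewrite author's own statement) =====
-- stated objective: alternative
-- what changed: A converts escape sequences inline during a single scan that mixes math-delimiter tracking with conversion; B first segments the text into tagged math/plain chunks (pure region finding, no conversion) and then converts the control escapes per plain segment in a separate pass before joining.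
import Mathlib
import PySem

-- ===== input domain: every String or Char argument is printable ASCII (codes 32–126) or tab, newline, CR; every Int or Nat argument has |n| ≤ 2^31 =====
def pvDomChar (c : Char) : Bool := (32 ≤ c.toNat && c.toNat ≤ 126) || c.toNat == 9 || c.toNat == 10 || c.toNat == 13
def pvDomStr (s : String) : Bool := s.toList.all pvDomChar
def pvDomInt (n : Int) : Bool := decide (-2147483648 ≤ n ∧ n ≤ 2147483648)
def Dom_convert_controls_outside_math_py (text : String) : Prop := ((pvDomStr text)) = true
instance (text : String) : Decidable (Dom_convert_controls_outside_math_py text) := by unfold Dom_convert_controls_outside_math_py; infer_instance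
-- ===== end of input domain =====

-- B re-decomposes A's single transform-while-scanning loop into a region-finding pass
-- producing tagged math/plain segments plus a separate escape-conversion pass over the
-- plain segments (objective: alternative decomposition, same O(n) cost).

-- ===== PORT A =====
-- Python nested helper `_is_escaped_dollar`: counts the backslashes immediately before
-- position i; `rev` is the reversed already-consumed prefix of the text.
def pvEscDollar (rev : List Char) : Bool :=
  (rev.takeWhile fun c => c == '\\').length % 2 == 1

-- A's while-loop: `rest` = text[i:], `rev` = reversed text[:i], `stack` = math_stack;
-- returns the characters the remaining iterations append to `result`.
def pvLoopA : List Char → List Char → List (List Char) → List Char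
  | [], _, _ => []
  | c :: t, rev, stack =>
    if c = '$' ∧ pvEscDollar rev = false then
      (c :: t.takeWhile fun x => x == '$') ++
        pvLoopA (t.dropWhile fun x => x == '$')
          ((c :: t.takeWhile fun x => x == '$').reverse ++ rev)
          (if stack ≠ [] ∧ stack.headI = (c :: t.takeWhile fun x => x == '$') then stack.tail
           else (c :: t.takeWhile fun x => x == '$') :: stack)
    else if c = '\\' ∧ t.head? = some '(' then
      '\\' :: '(' :: pvLoopA t.tail ('(' :: '\\' :: rev) (['\\', ')'] :: stack)
    else if c = '\\' ∧ t.head? = some '[' then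
      '\\' :: '[' :: pvLoopA t.tail ('[' :: '\\' :: rev) (['\\', ']'] :: stack)
    -- `math_stack[-1]` is `stack.headI`; a pushed delimiter is never empty, so requiring
    -- `stack.headI ≠ []` only rules out an unreachable state (Python: startswith('')).
    else if h4 : c = '\\' ∧ stack.headI ≠ [] ∧ stack.headI <+: (c :: t) then
      stack.headI ++ pvLoopA ((c :: t).drop stack.headI.length) (stack.headI.reverse ++ rev) stack.tail
    else if stack ≠ [] then
      c :: pvLoopA t (c :: rev) stack
    else
      if c = '\\' ∧ ['r', '\\', 'n'] <+: t then
        '\n' :: pvLoopA (t.drop 3) ('n' :: '\\' :: 'r' :: '\\' :: rev) []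
      else if c = '\\' ∧ t.head? = some 'n' then
        '\n' :: pvLoopA t.tail ('n' :: '\\' :: rev) []
      else if c = '\\' ∧ t.head? = some 'r' then
        '\n' :: pvLoopA t.tail ('r' :: '\\' :: rev) []
      else c :: pvLoopA t (c :: rev) []
  termination_by rest _ _ => rest.length
  decreasing_by
  all_goals first
    | (have := List.length_dropWhile_le (fun x => x == '$') t; simp; omega)
    | (have := List.length_pos_of_ne_nil h4.2.1
       simp only [List.length_drop, List.length_cons]; omega)
    | (simp [List.length_tail]; omega)
    | (simp; omega)
    | simp

def convert_controls_outside_math_py (text : String) : String :=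
  if text.toList = [] ∨ ¬ ('\\' ∈ text.toList) then text
  else String.ofList (pvLoopA text.toList [] [])

-- ===== PORT B =====
-- B's `_convert_plain`: converts the \r\n, \n, \r escapes of one plain segment.
def pvConvPlain : List Char → List Char
  | [] => []
  | c :: t =>
    if c = '\\' ∧ ['r', '\\', 'n'] <+: t then '\n' :: pvConvPlain (t.drop 3)
    else if c = '\\' ∧ (t.head? = some 'n' ∨ t.head? = some 'r') then '\n' :: pvConvPlain t.tail
    else c :: pvConvPlain t
  termination_by l => l.length
  decreasing_by
  all_goals first
    | (simp [List.length_tail]; omega)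
    | (simp; omega)
    | simp

-- B's `if buf: segments.append((False, ''.join(buf))); buf = []`.
def pvFlush (buf : List Char) : List (Bool × List Char) :=
  if buf = [] then [] else [(false, buf)]

-- B's pass 1: the segmentation loop; returns the remaining tagged segments.
def pvSegB : List Char → List Char → List (List Char) → List Char → List (Bool × List Char)
  | [], _, _, buf => pvFlush buf
  | c :: t, rev, stack, buf =>
    if c = '$' ∧ pvEscDollar rev = false then
      pvFlush buf ++ (true, c :: t.takeWhile fun x => x == '$') ::
        pvSegB (t.dropWhile fun x => x == '$')
          ((c :: t.takeWhile fun x => x == '$').reverse ++ rev)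
          (if stack ≠ [] ∧ stack.headI = (c :: t.takeWhile fun x => x == '$') then stack.tail
           else (c :: t.takeWhile fun x => x == '$') :: stack) []
    else if c = '\\' ∧ t.head? = some '(' then
      pvFlush buf ++ (true, ['\\', '(']) :: pvSegB t.tail ('(' :: '\\' :: rev) (['\\', ')'] :: stack) []
    else if c = '\\' ∧ t.head? = some '[' then
      pvFlush buf ++ (true, ['\\', '[']) :: pvSegB t.tail ('[' :: '\\' :: rev) (['\\', ']'] :: stack) []
    -- `math_stack[-1]` is `stack.headI`; as in port A the `≠ []` conjunct only rules out
    -- an unreachable state.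
    else if h4 : c = '\\' ∧ stack.headI ≠ [] ∧ stack.headI <+: (c :: t) then
      (true, stack.headI) :: pvSegB ((c :: t).drop stack.headI.length) (stack.headI.reverse ++ rev) stack.tail buf
    else if stack ≠ [] then
      (true, [c]) :: pvSegB t (c :: rev) stack buf
    else pvSegB t (c :: rev) [] (buf ++ [c])
  termination_by rest _ _ _ => rest.length
  decreasing_by
  all_goals first
    | (have := List.length_dropWhile_le (fun x => x == '$') t; simp; omega)
    | (have := List.length_pos_of_ne_nil h4.2.1
       simp only [List.length_drop, List.length_cons]; omega)
    | (simp [List.length_tail]; omega)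
    | (simp; omega)
    | simp

-- B's pass 2 + join: ''.join(seg if is_math else _convert_plain(seg) ...).
def pvRender : List (Bool × List Char) → List Char
  | [] => []
  | (m, s) :: segs => (if m then s else pvConvPlain s) ++ pvRender segs

def convert_controls_outside_math_py_alt (text : String) : String :=
  if text.toList = [] ∨ ¬ ('\\' ∈ text.toList) then text
  else String.ofList (pvRender (pvSegB text.toList [] [] []))

-- ===== PRECONDITION & SPEC =====
def Spec_convert_controls_outside_math_py (text : String) (out : String) : Prop := out = convert_controls_outside_math_py_alt text
instance (text : String) (out : String) : Decidable (Spec_convert_controls_outside_math_py text out) := by unfold Spec_convert_controls_outside_math_py; infer_instance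

-- ===== CLAIM (what is proved, stated in full; the proofs are below) =====
def Claim_equal_convert_controls_outside_math_py : Prop := ∀ (text : String), Dom_convert_controls_outside_math_py text → Spec_convert_controls_outside_math_py text (convert_controls_outside_math_py text)

-- ===== LEMMAS AND PROOFS =====

-- `buf` may be split off the pending plain segment: no escape token crosses the cut.
def pvGood (buf rest : List Char) : Prop :=
  (['\\'] <:+ buf → rest.head? ≠ some 'n' ∧ rest.head? ≠ some 'r')
  ∧ (['\\', 'r'] <:+ buf → ¬ (['\\', 'n'] <+: rest))

theorem pvLast_of_suffix {s L : List Char} {a : Char} (h : (s ++ [a]) <:+ L) :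
    L.getLast? = some a := by
  obtain ⟨l, rfl⟩ := h
  rw [← List.append_assoc]
  exact List.getLast?_concat

theorem pvSuffix_concat {s L : List Char} {a c : Char} (h : (s ++ [a]) <:+ (L ++ [c])) :
    a = c ∧ s <:+ L := by
  obtain ⟨l, hl⟩ := h
  rw [← List.append_assoc] at hl
  have hac : a = c := by
    have := congrArg List.getLast? hl
    simpa [List.getLast?_concat] using this
  subst hac
  have : l ++ s = L := List.append_cancel_right hl
  exact ⟨rfl, l, this⟩

theorem pvSuffix_cons {l b : List Char} (c : Char) (h : l <:+ b) : l <:+ c :: b :=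
  h.trans (List.suffix_cons c b)

theorem pvConvPlain_nil : pvConvPlain [] = [] := by rw [pvConvPlain]

theorem pvConvPlain_step (c : Char) (t : List Char)
    (h1 : ¬ (c = '\\' ∧ ['r', '\\', 'n'] <+: t))
    (h2 : ¬ (c = '\\' ∧ (t.head? = some 'n' ∨ t.head? = some 'r'))) :
    pvConvPlain (c :: t) = c :: pvConvPlain t := by
  rw [pvConvPlain, if_neg h1, if_neg h2]

theorem pvConvPlain_brn (t : List Char) :
    pvConvPlain ('\\' :: 'r' :: '\\' :: 'n' :: t) = '\n' :: pvConvPlain t := by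
  rw [pvConvPlain, if_pos ⟨rfl, t, rfl⟩]
  simp

theorem pvConvPlain_bn (t : List Char) :
    pvConvPlain ('\\' :: 'n' :: t) = '\n' :: pvConvPlain t := by
  rw [pvConvPlain, if_neg, if_pos ⟨rfl, Or.inl rfl⟩]
  · simp
  · rintro ⟨-, l, hl⟩
    simp at hl
theorem pvConvPlain_br (t : List Char) (h : ¬ (['\\', 'n'] <+: t)) :
    pvConvPlain ('\\' :: 'r' :: t) = '\n' :: pvConvPlain t := by
  rw [pvConvPlain, if_neg, if_pos ⟨rfl, Or.inr rfl⟩]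
  · simp
  · rintro ⟨-, l, hl⟩
    exact h ⟨l, by simpa using hl⟩

theorem pvConvPlain_singleton (c : Char) : pvConvPlain [c] = [c] := by
  rw [pvConvPlain_step _ _ (by simp) (by simp), pvConvPlain_nil]

theorem pvConvPlainAppendAux (n : Nat) : ∀ (b s : List Char), b.length ≤ n →
    (['\\'] <:+ b → s.head? ≠ some 'n' ∧ s.head? ≠ some 'r') →
    (['\\', 'r'] <:+ b → ¬ (['\\', 'n'] <+: s)) →
    pvConvPlain (b ++ s) = pvConvPlain b ++ pvConvPlain s := by
  induction n with
  | zero =>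
    intro b s hlen h1 h2
    have hb : b = [] := by cases b with
      | nil => rfl
      | cons c t => simp at hlen
    subst hb
    rw [pvConvPlain_nil, List.nil_append, List.nil_append]
  | succ m ih =>
    intro b s hlen h1 h2
    rcases b with _ | ⟨c, b'⟩
    · rw [pvConvPlain_nil, List.nil_append, List.nil_append]
    by_cases q1 : c = '\\' ∧ ['r', '\\', 'n'] <+: b'
    · obtain ⟨rfl, l, hl⟩ := q1
      subst hl
      rw [show ('\\' :: (['r', '\\', 'n'] ++ l)) ++ s = '\\' :: 'r' :: '\\' :: 'n' :: (l ++ s) by simp,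
        show ('\\' :: (['r', '\\', 'n'] ++ l)) = '\\' :: 'r' :: '\\' :: 'n' :: l by simp,
        pvConvPlain_brn, pvConvPlain_brn,
        ih l s (by simp at hlen ⊢; omega)
          (fun hs => h1 (pvSuffix_cons _ (pvSuffix_cons _ (pvSuffix_cons _ (pvSuffix_cons _ hs)))))
          (fun hs => h2 (pvSuffix_cons _ (pvSuffix_cons _ (pvSuffix_cons _ (pvSuffix_cons _ hs)))))]
      simp
    · by_cases q2 : c = '\\' ∧ (b'.head? = some 'n' ∨ b'.head? = some 'r')
      · obtain ⟨rfl, hh⟩ := q2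
        rcases b' with _ | ⟨c2, b''⟩
        · simp at hh
        rcases hh with h | h
        · have hc2 : c2 = 'n' := by simpa using h
          subst hc2
          rw [show ('\\' :: 'n' :: b'') ++ s = '\\' :: 'n' :: (b'' ++ s) by simp,
            pvConvPlain_bn, pvConvPlain_bn,
            ih b'' s (by simp at hlen ⊢; omega)
              (fun hs => h1 (pvSuffix_cons _ (pvSuffix_cons _ hs)))
              (fun hs => h2 (pvSuffix_cons _ (pvSuffix_cons _ hs)))]
          simp
        · have hc2 : c2 = 'r' := by simpa using h
          subst hc2
          have hq : ¬ (['\\', 'n'] <+: b'') := by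
            rintro ⟨l, hl⟩
            exact q1 ⟨rfl, ⟨l, by simp [← hl]⟩⟩
          have hq2 : ¬ (['\\', 'n'] <+: (b'' ++ s)) := by
            rintro ⟨l, hl⟩
            rcases b'' with _ | ⟨c3, b3⟩
            · simp only [List.nil_append] at hl
              exact h2 List.suffix_rfl ⟨l, hl⟩
            · rcases b3 with _ | ⟨c4, b4⟩
              · simp only [List.cons_append, List.nil_append, List.cons.injEq] at hl
                obtain ⟨rfl, hs⟩ := hl
                exact (h1 ⟨['\\', 'r'], rfl⟩).1 (by simp [← hs])
              · simp only [List.cons_append, List.cons.injEq] at hl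
                obtain ⟨rfl, rfl, -⟩ := hl
                exact hq ⟨b4, rfl⟩
          rw [show ('\\' :: 'r' :: b'') ++ s = '\\' :: 'r' :: (b'' ++ s) by simp,
            pvConvPlain_br _ hq2, pvConvPlain_br _ hq,
            ih b'' s (by simp at hlen ⊢; omega)
              (fun hs => h1 (pvSuffix_cons _ (pvSuffix_cons _ hs)))
              (fun hs => h2 (pvSuffix_cons _ (pvSuffix_cons _ hs)))]
          simp
      · have C2 : ¬ (c = '\\' ∧ ((b' ++ s).head? = some 'n' ∨ (b' ++ s).head? = some 'r')) := by
          rintro ⟨rfl, h⟩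
          rcases b' with _ | ⟨c2, b2⟩
          · simp at h
            rcases h with h | h
            · exact (h1 List.suffix_rfl).1 h
            · exact (h1 List.suffix_rfl).2 h
          · simp at h
            exact q2 ⟨rfl, by simp [h]⟩
        have C1 : ¬ (c = '\\' ∧ ['r', '\\', 'n'] <+: (b' ++ s)) := by
          rintro ⟨rfl, l, hl⟩
          rcases b' with _ | ⟨c2, b2⟩
          · simp only [List.nil_append] at hl
            exact (h1 List.suffix_rfl).2 (by simp [← hl])
          · rcases b2 with _ | ⟨c3, b3⟩
            · simp only [List.cons_append, List.nil_append, List.cons.injEq] at hl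
              obtain ⟨rfl, hs⟩ := hl
              exact h2 ⟨[], rfl⟩ ⟨l, hs⟩
            · rcases b3 with _ | ⟨c4, b4⟩
              · simp only [List.cons_append, List.nil_append, List.cons.injEq] at hl
                obtain ⟨rfl, rfl, hs⟩ := hl
                exact (h1 ⟨['\\', 'r'], rfl⟩).1 (by simp [← hs])
              · simp only [List.cons_append, List.cons.injEq] at hl
                obtain ⟨rfl, rfl, rfl, -⟩ := hl
                exact q1 ⟨rfl, ⟨b4, rfl⟩⟩
        rw [show (c :: b') ++ s = c :: (b' ++ s) by simp,
          pvConvPlain_step _ _ C1 C2, pvConvPlain_step _ _ q1 q2,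
          ih b' s (by simp at hlen ⊢; omega) (fun hs => h1 (pvSuffix_cons _ hs))
            (fun hs => h2 (pvSuffix_cons _ hs))]
        simp

theorem pvConvPlain_append (b s : List Char)
    (h1 : ['\\'] <:+ b → s.head? ≠ some 'n' ∧ s.head? ≠ some 'r')
    (h2 : ['\\', 'r'] <:+ b → ¬ (['\\', 'n'] <+: s)) :
    pvConvPlain (b ++ s) = pvConvPlain b ++ pvConvPlain s :=
  pvConvPlainAppendAux b.length b s le_rfl h1 h2


-- rendering helpers for B's segment list
theorem pvRender_nil : pvRender [] = [] := by rw [pvRender]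

theorem pvRender_append (a b : List (Bool × List Char)) :
    pvRender (a ++ b) = pvRender a ++ pvRender b := by
  induction a with
  | nil => rw [pvRender_nil, List.nil_append, List.nil_append]
  | cons p r ihh =>
    obtain ⟨m, s⟩ := p
    rw [List.cons_append, pvRender, pvRender, ihh, List.append_assoc]

theorem pvRender_true (s : List Char) (R : List (Bool × List Char)) :
    pvRender ((true, s) :: R) = s ++ pvRender R := by
  rw [pvRender, if_pos rfl]

theorem pvRender_flush (buf : List Char) : pvRender (pvFlush buf) = pvConvPlain buf := by
  by_cases h : buf = []
  · subst h; rw [pvFlush, if_pos rfl, pvRender_nil, pvConvPlain_nil]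
  · rw [pvFlush, if_neg h, pvRender, if_neg (by simp), pvRender_nil, List.append_nil]

theorem pvLastAppend1 (buf : List Char) (x : Char) : (buf ++ [x]).getLast? = some x :=
  List.getLast?_concat

theorem pvLastAppend2 (buf : List Char) (x y : Char) : (buf ++ [x, y]).getLast? = some y := by
  rw [show buf ++ [x, y] = (buf ++ [x]) ++ [y] by simp]; exact List.getLast?_concat

theorem pvLastAppend4 (buf : List Char) (x y z w : Char) :
    (buf ++ [x, y, z, w]).getLast? = some w := by
  rw [show buf ++ [x, y, z, w] = (buf ++ [x, y, z]) ++ [w] by simp]; exact List.getLast?_concat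

theorem pvSuffix_ne {s L : List Char} {a b : Char} (h1 : (s ++ [a]) <:+ L)
    (h2 : L.getLast? = some b) (hne : a ≠ b) : False := by
  have h3 := pvLast_of_suffix h1
  rw [h2] at h3
  exact hne (by simpa using h3.symm)

-- main invariant: rendering B's remaining segments equals the conversion of the pending
-- plain buffer followed by A's remaining output.
theorem pvMain (n : Nat) : ∀ (rest rev : List Char) (stack : List (List Char)) (buf : List Char),
    rest.length ≤ n → (stack ≠ [] → buf = []) → pvGood buf rest →
    pvRender (pvSegB rest rev stack buf) = pvConvPlain buf ++ pvLoopA rest rev stack := by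
  induction n with
  | zero =>
    intro rest rev stack buf hlen _ _
    have h : rest = [] := by
      cases rest with
      | nil => rfl
      | cons c t => simp at hlen
    subst h
    rw [pvSegB, pvLoopA, pvRender_flush, List.append_nil]
  | succ m ih =>
    intro rest rev stack buf hlen hsb hg
    rcases rest with _ | ⟨c, t⟩
    · rw [pvSegB, pvLoopA, pvRender_flush, List.append_nil]
    rw [pvSegB, pvLoopA]
    by_cases q1 : c = '$' ∧ pvEscDollar rev = false
    · rw [if_pos q1, if_pos q1, pvRender_append, pvRender_flush, pvRender_true,
        ih _ _ _ []
          (by have h1 := List.length_dropWhile_le (fun x => x == '$') t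
              simp only [List.length_cons] at hlen; omega)
          (fun _ => rfl) ⟨by simp, by simp⟩,
        pvConvPlain_nil, List.nil_append]
    rw [if_neg q1, if_neg q1]
    by_cases q2 : c = '\\' ∧ t.head? = some '('
    · rw [if_pos q2, if_pos q2, pvRender_append, pvRender_flush, pvRender_true,
        ih _ _ _ []
          (by simp only [List.length_tail, List.length_cons] at hlen ⊢; omega)
          (fun _ => rfl) ⟨by simp, by simp⟩,
        pvConvPlain_nil, List.nil_append]
      simp
    rw [if_neg q2, if_neg q2]
    by_cases q3 : c = '\\' ∧ t.head? = some '['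
    · rw [if_pos q3, if_pos q3, pvRender_append, pvRender_flush, pvRender_true,
        ih _ _ _ []
          (by simp only [List.length_tail, List.length_cons] at hlen ⊢; omega)
          (fun _ => rfl) ⟨by simp, by simp⟩,
        pvConvPlain_nil, List.nil_append]
      simp
    rw [if_neg q3, if_neg q3]
    by_cases q4 : c = '\\' ∧ stack.headI ≠ [] ∧ stack.headI <+: (c :: t)
    · have hst : stack ≠ [] := by
        rintro rfl
        exact q4.2.1 rfl
      have hbuf : buf = [] := hsb hst
      subst hbuf
      rw [dif_pos q4, dif_pos q4, pvRender_true,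
        ih _ _ stack.tail []
          (by have hk := List.length_pos_of_ne_nil q4.2.1
              simp only [List.length_drop, List.length_cons] at ⊢ hlen; omega)
          (fun _ => rfl) ⟨by simp, by simp⟩, pvConvPlain_nil]
      simp
    rw [dif_neg q4, dif_neg q4]
    by_cases q5 : stack ≠ []
    · have hbuf : buf = [] := hsb q5
      subst hbuf
      rw [if_pos q5, if_pos q5, pvRender_true,
        ih t _ stack [] (by simp only [List.length_cons] at hlen; omega) (fun _ => hsb q5)
          ⟨by simp, by simp⟩, pvConvPlain_nil]
      simp
    · have hst : stack = [] := not_not.mp q5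
      subst hst
      rw [if_neg q5, if_neg q5]
      -- outside math: A converts escapes, B buffers the character
      by_cases q6 : c = '\\' ∧ ['r', '\\', 'n'] <+: t
      · obtain ⟨hc, l, hl⟩ := q6
        subst hc
        subst hl
        rw [if_pos ⟨rfl, ⟨l, rfl⟩⟩]
        rw [show (['r', '\\', 'n'] ++ l : List Char) = 'r' :: '\\' :: 'n' :: l by simp]
        rw [pvSegB, if_neg (by simp), if_neg (by simp), if_neg (by simp), dif_neg (by rintro ⟨-, h, -⟩; exact h rfl),
          if_neg (by simp)]
        rw [pvSegB, if_neg (by simp), if_neg (by simp), if_neg (by simp), dif_neg (by rintro ⟨-, h, -⟩; exact h rfl),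
          if_neg (by simp)]
        rw [pvSegB, if_neg (by simp), if_neg (by simp), if_neg (by simp), dif_neg (by rintro ⟨-, h, -⟩; exact h rfl),
          if_neg (by simp)]
        rw [show (((buf ++ ['\\']) ++ ['r']) ++ ['\\']) ++ ['n'] = buf ++ ['\\', 'r', '\\', 'n'] by simp]
        rw [show (('r' :: '\\' :: 'n' :: l).drop 3) = l by simp]
        rw [ih l _ [] _ (by simp only [List.length_cons, List.length_append, List.length_nil] at hlen; omega) (fun h => absurd rfl h)
          ⟨fun hsuf => (pvSuffix_ne (s := []) hsuf (pvLastAppend4 _ _ _ _ _) (by decide)).elim,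
           fun hsuf => (pvSuffix_ne (s := ['\\']) (a := 'r') hsuf (pvLastAppend4 _ _ _ _ _) (by decide)).elim⟩]
        rw [pvConvPlain_append buf ['\\', 'r', '\\', 'n'] (fun _ => ⟨by simp, by simp⟩)
          (fun _ => by decide), pvConvPlain_brn, pvConvPlain_nil]
        simp
      · rw [if_neg q6]
        by_cases q7 : c = '\\' ∧ t.head? = some 'n'
        · obtain ⟨hc, hh⟩ := q7
          subst hc
          rcases t with _ | ⟨c2, t2⟩
          · simp at hh
          have hc2 : c2 = 'n' := by simpa using hh
          subst hc2
          rw [if_pos ⟨rfl, rfl⟩]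
          rw [pvSegB, if_neg (by simp), if_neg (by simp), if_neg (by simp), dif_neg (by rintro ⟨-, h, -⟩; exact h rfl),
            if_neg (by simp)]
          rw [show (buf ++ ['\\']) ++ ['n'] = buf ++ ['\\', 'n'] by simp]
          have hbr : ¬ (['\\', 'r'] <:+ buf) := fun hsuf => hg.2 hsuf ⟨t2, rfl⟩
          rw [ih t2 _ [] _ (by simp only [List.length_cons] at hlen; omega) (fun h => absurd rfl h)
            ⟨fun hsuf => (pvSuffix_ne (s := []) hsuf (pvLastAppend2 _ _ _) (by decide)).elim,
             fun hsuf => (pvSuffix_ne (s := ['\\']) (a := 'r') hsuf (pvLastAppend2 _ _ _) (by decide)).elim⟩]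
          rw [pvConvPlain_append buf ['\\', 'n'] (fun _ => ⟨by simp, by simp⟩)
            (fun hsuf => absurd hsuf hbr), pvConvPlain_bn, pvConvPlain_nil]
          simp
        · rw [if_neg q7]
          by_cases q8 : c = '\\' ∧ t.head? = some 'r'
          · obtain ⟨hc, hh⟩ := q8
            subst hc
            rcases t with _ | ⟨c2, t2⟩
            · simp at hh
            have hc2 : c2 = 'r' := by simpa using hh
            subst hc2
            rw [if_pos ⟨rfl, rfl⟩]
            rw [pvSegB, if_neg (by simp), if_neg (by simp), if_neg (by simp), dif_neg (by simp),
              if_neg (by simp)]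
            rw [show (buf ++ ['\\']) ++ ['r'] = buf ++ ['\\', 'r'] by simp]
            have hnr : ¬ (['\\', 'n'] <+: t2) := by
              rintro ⟨l, hl⟩
              exact q6 ⟨rfl, ⟨l, by rw [← hl]; simp⟩⟩
            rw [ih t2 _ [] _ (by simp only [List.length_cons] at hlen; omega) (fun h => absurd rfl h)
              ⟨fun hsuf => (pvSuffix_ne (s := []) hsuf (pvLastAppend2 _ _ _) (by decide)).elim,
               fun _ => hnr⟩]
            rw [pvConvPlain_append buf ['\\', 'r'] (fun _ => ⟨by simp, by simp⟩)
              (fun _ => by decide), pvConvPlain_br _ (by simp), pvConvPlain_nil]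
            simp
          · rw [if_neg q8]
            have hnew : pvGood (buf ++ [c]) t := by
              constructor
              · intro hsuf
                have hc : c = '\\' := by
                  have h' := pvLast_of_suffix (s := ([] : List Char)) hsuf
                  rw [pvLastAppend1 buf c] at h'
                  simpa using h'
                exact ⟨fun hn => q7 ⟨hc, hn⟩, fun hr => q8 ⟨hc, hr⟩⟩
              · intro hsuf
                obtain ⟨hcr, hbs⟩ := pvSuffix_concat (s := ['\\']) hsuf
                exact ((hg.1 hbs).2 (by simp [← hcr])).elim
            rw [ih t _ [] _ (by simp only [List.length_cons] at hlen; omega) (fun h => absurd rfl h) hnew]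
            rw [pvConvPlain_append buf [c]
              (fun hsuf => ⟨fun h => (hg.1 hsuf).1 h, fun h => (hg.1 hsuf).2 h⟩)
              (fun _ => by rintro ⟨l, hl⟩; simp at hl), pvConvPlain_singleton]
            simp

-- ===== VERDICT (by name: the statement is the Claim_ definition above) =====
theorem convert_controls_outside_math_py_spec : Claim_equal_convert_controls_outside_math_py := by
  intro text _
  unfold Spec_convert_controls_outside_math_py
  unfold convert_controls_outside_math_py convert_controls_outside_math_py_alt
  by_cases h : text.toList = [] ∨ ¬ ('\\' ∈ text.toList)
  · rw [if_pos h, if_pos h]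
  · rw [if_neg h, if_neg h]
    have := pvMain text.toList.length text.toList [] [] [] le_rfl (by intro h; simp)
      ⟨by simp, by simp⟩
    rw [this, pvConvPlain_nil, List.nil_append]
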